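-- pv_equiv track=rewrite | github.com/AdamZhouSE/pythonHomework | Code/CodeRecords/2806/60677/238576.py | func
-- ===== SOURCE A (Python) =====
-- def findMin(list1,n):
--     answer=0
--     for i in range(1,n):
--         if list1[i]<list1[answer]:
--             answer=i
--     return answer
--
-- def func(meat,price,n):
--     count=findMin(price,n)
--     addition=0
--     for i in range(count,n):
--         addition+=meat[i]*price[count]
--     if count==0:
--         return addition
--     else:
--         return func(meat[0:count],price[0:count],count)+addition
-- ===== SOURCE B (Python) =====
-- def func(meat, price, n):
--     total = 0
--     m = 0
--     for i in range(n):
--         if i == 0 or price[i] < m: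
--             m = price[i]
--         total += meat[i] * m
--     return total
-- ===== Notes on version B (the rewrite author's own statement) =====
-- stated objective: faster
-- what changed: Replaced the recursive find-global-min-then-recurse-on-prefix scheme by a single left-to-right pass that maintains the running prefix minimum of price and accumulates meat[i] times that minimum.
import Mathlib
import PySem

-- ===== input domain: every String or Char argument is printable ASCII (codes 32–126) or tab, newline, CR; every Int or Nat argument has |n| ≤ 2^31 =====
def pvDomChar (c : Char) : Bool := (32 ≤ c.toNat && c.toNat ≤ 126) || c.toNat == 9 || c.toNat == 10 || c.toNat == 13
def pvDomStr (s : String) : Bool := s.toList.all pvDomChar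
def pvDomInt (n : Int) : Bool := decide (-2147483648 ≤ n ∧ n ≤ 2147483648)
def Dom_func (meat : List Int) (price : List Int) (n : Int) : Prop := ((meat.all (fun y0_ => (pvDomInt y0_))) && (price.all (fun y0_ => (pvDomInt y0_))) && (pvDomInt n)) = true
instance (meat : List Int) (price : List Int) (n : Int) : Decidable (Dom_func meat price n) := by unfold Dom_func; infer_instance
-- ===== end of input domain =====

-- B replaces A's recursive "global-min then recurse on the prefix" (O(n^2)) by one pass
-- maintaining the running prefix minimum of price (measured faster, asymptotic change).

-- ===== PORT A =====
def findMin (list1 : List Int) (n : Int) : Int :=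
  (PySem.List.pyRange 1 n 1).foldl
    (fun answer i =>
      if PySem.List.pyGetD list1 i 0 < PySem.List.pyGetD list1 answer 0 then i else answer) 0

-- termination helper for func (the selection fold returns its start value or a list element)
theorem pvFoldSel_mem (g : Int → Int → Bool) :
    ∀ (xs : List Int) (a : Int),
      xs.foldl (fun ans i => if g ans i then i else ans) a = a ∨
      xs.foldl (fun ans i => if g ans i then i else ans) a ∈ xs := by
  intro xs
  induction xs with
  | nil => intro a; left; rfl
  | cons x xs ih =>
    intro a
    simp only [List.foldl_cons]
    rcases ih (if g a x then x else a) with h | h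
    · rw [h]; by_cases hg : g a x
      · right; simp [hg]
      · left; simp [hg]
    · right; exact List.mem_cons_of_mem _ h

theorem findMin_range (list1 : List Int) (n : Int) (h : findMin list1 n ≠ 0) :
    1 ≤ findMin list1 n ∧ findMin list1 n < n := by
  rcases pvFoldSel_mem (fun ans i => decide (PySem.List.pyGetD list1 i 0 < PySem.List.pyGetD list1 ans 0))
      (PySem.List.pyRange 1 n 1) 0 with hm | hm
  · exact absurd (by simpa [findMin] using hm) h
  · have := (PySem.List.mem_pyRange_one).mp (by simpa [findMin] using hm)
    simpa [findMin] using this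

def func (meat : List Int) (price : List Int) (n : Int) : Int :=
  let count := findMin price n
  let addition := (PySem.List.pyRange count n 1).foldl
    (fun addition i => addition + PySem.List.pyGetD meat i 0 * PySem.List.pyGetD price count 0) 0
  if h : count = 0 then addition
  else
    func (PySem.List.slice meat (some 0) (some count))
         (PySem.List.slice price (some 0) (some count)) count + addition
termination_by n.toNat
decreasing_by
  have hb := findMin_range price n h
  omega

-- ===== PORT B =====
def func_alt (meat : List Int) (price : List Int) (n : Int) : Int :=
  ((PySem.List.pyRange 0 n 1).foldl
    (fun (s : Int × Int) i =>
      let m := if i = 0 ∨ PySem.List.pyGetD price i 0 < s.2 then PySem.List.pyGetD price i 0 else s.2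
      (s.1 + PySem.List.pyGetD meat i 0 * m, m))
    (0, 0)).1

-- ===== PRECONDITION & SPEC =====
-- Pre_: the Python A indexes meat[i] and price[i] for all 0 ≤ i < n, so it raises IndexError
-- unless n ≤ len(meat) and n ≤ len(price); exactly those raising inputs are excluded.
-- (The ports, whose pyGetD is total, happen to agree even there, so the equality proof
-- does not use this hypothesis; Pre_ only marks where the Python A raises.)
def Pre_func (meat : List Int) (price : List Int) (n : Int) : Prop :=
  n ≤ (meat.length : Int) ∧ n ≤ (price.length : Int)
instance (meat : List Int) (price : List Int) (n : Int) : Decidable (Pre_func meat price n) := by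
  unfold Pre_func; infer_instance

def pvWitness_func : List Int × List Int × Int := ([2, 3, 1], [4, 1, 5], 3)

def Spec_func (meat : List Int) (price : List Int) (n : Int) (out : Int) : Prop := out = func_alt meat price n
instance (meat : List Int) (price : List Int) (n : Int) (out : Int) : Decidable (Spec_func meat price n out) := by unfold Spec_func; infer_instance

-- ===== CLAIM (what is proved, stated in full; the proofs are below) =====
def Claim_equal_func : Prop := ∀ (meat : List Int) (price : List Int) (n : Int), Dom_func meat price n → Pre_func meat price n → Spec_func meat price n (func meat price n)

-- ===== LEMMAS AND PROOFS =====

-- running prefix minimum of price (value form of B's loop variable m)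
def pvPm (price : List Int) : Nat → Int
  | 0 => price.getD 0 0
  | k + 1 => if price.getD (k + 1) 0 < pvPm price k then price.getD (k + 1) 0 else pvPm price k

-- the intended sum: Σ_{i<k} meat[i] * (min of price[0..i])
def pvS (meat : List Int) (price : List Int) : Nat → Int
  | 0 => 0
  | k + 1 => pvS meat price k + meat.getD k 0 * pvPm price k

theorem pvPm_le (price : List Int) : ∀ j i : Nat, i ≤ j → pvPm price j ≤ price.getD i 0 := by
  intro j
  induction j with
  | zero => intro i hi; interval_cases i; simp [pvPm]
  | succ k ih =>
    intro i hi
    rcases Nat.lt_or_ge i (k + 1) with hik | hik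
    · have := ih i (by omega)
      simp only [pvPm]; split_ifs with hc <;> omega
    · have : i = k + 1 := by omega
      subst this
      simp only [pvPm]; split_ifs with hc <;> omega

theorem pvPm_mem (price : List Int) : ∀ j : Nat, ∃ i, i ≤ j ∧ pvPm price j = price.getD i 0 := by
  intro j
  induction j with
  | zero => exact ⟨0, le_refl _, rfl⟩
  | succ k ih =>
    rcases ih with ⟨i, hi, he⟩
    simp only [pvPm]
    split_ifs with hc
    · exact ⟨k + 1, le_refl _, rfl⟩
    · exact ⟨i, by omega, he⟩

theorem pvGetD_take (xs : List Int) (c i : Nat) (h : i < c) :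
    (xs.take c).getD i 0 = xs.getD i 0 := by
  simp [List.getD, List.getElem?_take_of_lt h]

theorem pvPm_take (price : List Int) (c : Nat) : ∀ j : Nat, j < c → pvPm (price.take c) j = pvPm price j := by
  intro j
  induction j with
  | zero => intro hj; show (price.take c).getD 0 0 = price.getD 0 0; exact pvGetD_take price c 0 (by omega)
  | succ k ih =>
    intro hj
    show (if (price.take c).getD (k+1) 0 < pvPm (price.take c) k then (price.take c).getD (k+1) 0
          else pvPm (price.take c) k) = _
    rw [pvGetD_take price c (k + 1) hj, ih (by omega)]
    rfl

theorem pvS_take (meat price : List Int) (c : Nat) :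
    ∀ j : Nat, j ≤ c → pvS (meat.take c) (price.take c) j = pvS meat price j := by
  intro j
  induction j with
  | zero => intro _; rfl
  | succ k ih =>
    intro hj
    show pvS (meat.take c) (price.take c) k + (meat.take c).getD k 0 * pvPm (price.take c) k = _
    rw [ih (by omega), pvGetD_take meat c k (by omega), pvPm_take price c k (by omega)]
    rfl

-- characterisation of A's findMin: nonnegative, < k, and its value is minimal on the prefix
theorem pvFindMin_spec (price : List Int) : ∀ k : Nat,
    0 ≤ findMin price (k : Int) ∧ (1 ≤ k → findMin price (k : Int) < (k : Int)) ∧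
    ∀ i : Nat, i < k → PySem.List.pyGetD price (findMin price (k : Int)) 0 ≤ price.getD i 0 := by
  intro k
  induction k with
  | zero =>
    have h0 : findMin price ((0 : Nat) : Int) = 0 := by
      simp [findMin, PySem.List.pyRange_one_eq_nil (show ((0:Nat):Int) ≤ 1 by omega)]
    exact ⟨by rw [h0], by omega, by intro i hi; omega⟩
  | succ k ih =>
    obtain ⟨ihp, ihlt, ihmin⟩ := ih
    rcases Nat.eq_zero_or_pos k with hk0 | hk1
    · subst hk0
      have h1 : findMin price ((0 + 1 : Nat) : Int) = 0 := by
        simp [findMin, PySem.List.pyRange_one_eq_nil (show ((0 + 1:Nat):Int) ≤ 1 by omega)]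
      refine ⟨by rw [h1], by intro _; rw [h1]; omega, ?_⟩
      intro i hi
      interval_cases i
      rw [h1, PySem.List.pyGetD_zero]
    · have hsplit : PySem.List.pyRange 1 ((k + 1 : Nat) : Int) 1
          = PySem.List.pyRange 1 (k : Int) 1 ++ [(k : Int)] := by
        rw [show ((k + 1 : Nat) : Int) = (k : Int) + 1 by push_cast; ring]
        exact PySem.List.pyRange_one_succ_right (by omega)
      have hstep : findMin price ((k + 1 : Nat) : Int)
          = (if PySem.List.pyGetD price (k : Int) 0
                < PySem.List.pyGetD price (findMin price (k : Int)) 0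
             then (k : Int) else findMin price (k : Int)) := by
        unfold findMin
        rw [hsplit, List.foldl_append]
        rfl
      have hgk : PySem.List.pyGetD price (k : Int) 0 = price.getD k 0 := by
        simp [PySem.List.pyGetD_natCast]
      rw [hstep]
      split_ifs with hc
      · refine ⟨by omega, by intro _; omega, ?_⟩
        intro i hi
        rcases Nat.lt_or_ge i k with hik | hik
        · have h2 := ihmin i hik
          omega
        · have hik' : i = k := by omega
          subst hik'
          rw [hgk]
      · refine ⟨ihp, by intro _; have := ihlt hk1; omega, ?_⟩
        intro i hi
        rcases Nat.lt_or_ge i k with hik | hik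
        · exact ihmin i hik
        · have hik' : i = k := by omega
          subst hik'
          rw [hgk] at hc
          omega

-- on [cN, k) the prefix minimum is constantly price[cN] when price[cN] is minimal over [0, k)
theorem pvPm_const (price : List Int) (cN k : Nat)
    (hmin : ∀ i : Nat, i < k → price.getD cN 0 ≤ price.getD i 0) :
    ∀ j : Nat, cN ≤ j → j < k → pvPm price j = price.getD cN 0 := by
  intro j hcj hjk
  have hle : pvPm price j ≤ price.getD cN 0 := pvPm_le price j cN hcj
  rcases pvPm_mem price j with ⟨i, hij, he⟩
  have hge : price.getD cN 0 ≤ pvPm price j := by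
    rw [he]; exact hmin i (by omega)
  omega

-- A's inner accumulation loop, summed against the constant prefix minimum
theorem pvSum_const (meat price : List Int) (v : Int) (a : Nat) : ∀ b : Nat, a ≤ b →
    (∀ j : Nat, a ≤ j → j < b → pvPm price j = v) →
    (PySem.List.pyRange (a : Int) (b : Int) 1).foldl
      (fun addition i => addition + PySem.List.pyGetD meat i 0 * v) 0
      = pvS meat price b - pvS meat price a := by
  intro b
  induction b with
  | zero =>
    intro hab _
    have ha0 : a = 0 := by omega
    subst ha0
    simp [PySem.List.pyRange_one_eq_nil (show ((0:Nat):Int) ≤ ((0:Nat):Int) by omega)]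
  | succ b ih =>
    intro hab hpm
    rcases Nat.lt_or_ge b a with hba | hba
    · have hab' : a = b + 1 := by omega
      subst hab'
      simp [PySem.List.pyRange_one_eq_nil (show ((b+1:Nat):Int) ≤ ((b+1:Nat):Int) by omega)]
    · have hsplit : PySem.List.pyRange (a : Int) ((b + 1 : Nat) : Int) 1
          = PySem.List.pyRange (a : Int) (b : Int) 1 ++ [(b : Int)] := by
        rw [show ((b + 1 : Nat) : Int) = (b : Int) + 1 by push_cast; ring]
        exact PySem.List.pyRange_one_succ_right (by omega)
      rw [hsplit, List.foldl_append,
        ih hba (fun j h1 h2 => hpm j h1 (by omega))]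
      have hb : PySem.List.pyGetD meat (b : Int) 0 = meat.getD b 0 := by
        simp [PySem.List.pyGetD_natCast]
      have hpmb : pvPm price b = v := hpm b hba (by omega)
      simp only [List.foldl_cons, List.foldl_nil, pvS, hb]
      rw [← hpmb]; ring

-- A computes the intended sum, by strong induction on k
theorem pvA_eq (k : Nat) : ∀ (meat price : List Int),
    func meat price (k : Int) = pvS meat price k := by
  induction k using Nat.strong_induction_on with
  | _ k ih =>
    intro meat price
    obtain ⟨hc0, hclt, hcmin⟩ := pvFindMin_spec price k
    by_cases hz : findMin price (k : Int) = 0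
    · -- no recursion: the whole sum is one constant-min block
      rw [func]
      rw [dif_pos hz, hz]
      have hmin0 : ∀ i : Nat, i < k → price.getD 0 0 ≤ price.getD i 0 := by
        intro i hi
        have := hcmin i hi
        rwa [hz, PySem.List.pyGetD_zero] at this
      have h := pvSum_const meat price (price.getD 0 0) 0 k (by omega)
        (fun j h1 h2 => pvPm_const price 0 k hmin0 j h1 h2)
      simp only [Nat.cast_zero] at h
      rw [PySem.List.pyGetD_zero, h]
      simp [pvS]
    · -- recursive case: the minimum index c satisfies 1 ≤ c < k
      have hk1 : 1 ≤ k := by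
        by_contra hk
        have hk0 : k = 0 := by omega
        apply hz
        rw [hk0]
        simp [findMin, PySem.List.pyRange_one_eq_nil (show ((0:Nat):Int) ≤ 1 by omega)]
      have hclt' : findMin price (k : Int) < (k : Int) := hclt hk1
      rw [func]
      rw [dif_neg hz]
      set c := findMin price (k : Int) with hc
      set cN := c.toNat with hcN
      have hcc : c = (cN : Int) := by omega
      have hcNk : cN < k := by omega
      have hv : PySem.List.pyGetD price c 0 = price.getD cN 0 := by
        rw [hcc]; simp [PySem.List.pyGetD_natCast]
      have hsm : PySem.List.slice meat (some 0) (some c) = meat.take cN := by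
        rw [hcc]; simp [PySem.List.slice_to_natCast]
      have hsp : PySem.List.slice price (some 0) (some c) = price.take cN := by
        rw [hcc]; simp [PySem.List.slice_to_natCast]
      have hrec : func (PySem.List.slice meat (some 0) (some c))
          (PySem.List.slice price (some 0) (some c)) c = pvS meat price cN := by
        rw [hsm, hsp, hcc, ih cN hcNk]
        exact pvS_take meat price cN cN (le_refl _)
      have hminN : ∀ i : Nat, i < k → price.getD cN 0 ≤ price.getD i 0 := by
        intro i hi
        have := hcmin i hi
        rwa [hv] at this
      have hadd : (PySem.List.pyRange c (k : Int) 1).foldl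
          (fun addition i => addition + PySem.List.pyGetD meat i 0 * PySem.List.pyGetD price c 0) 0
          = pvS meat price k - pvS meat price cN := by
        rw [hv, hcc]
        exact pvSum_const meat price (price.getD cN 0) cN k (by omega)
          (fun j h1 h2 => pvPm_const price cN k hminN j h1 h2)
      rw [hrec, hadd]; ring

-- B's fold maintains (partial sum, running prefix minimum)
theorem pvB_fold (meat price : List Int) : ∀ k : Nat,
    ((PySem.List.pyRange 0 ((k : Int) + 1) 1).foldl
      (fun (s : Int × Int) i =>
        let m := if i = 0 ∨ PySem.List.pyGetD price i 0 < s.2 then PySem.List.pyGetD price i 0 else s.2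
        (s.1 + PySem.List.pyGetD meat i 0 * m, m))
      (0, 0))
    = (pvS meat price (k + 1), pvPm price k) := by
  intro k
  induction k with
  | zero =>
    rw [show ((0:Nat):Int) + 1 = 0 + 1 by norm_num, PySem.List.pyRange_one_singleton]
    simp [pvS, pvPm, PySem.List.pyGetD_zero]
  | succ k ih =>
    have hsplit : PySem.List.pyRange 0 (((k + 1 : Nat) : Int) + 1) 1
        = PySem.List.pyRange 0 ((k : Int) + 1) 1 ++ [(k : Int) + 1] := by
      rw [show (((k + 1 : Nat) : Int) + 1) = ((k : Int) + 1) + 1 by push_cast; ring]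
      exact PySem.List.pyRange_one_succ_right (by omega)
    rw [hsplit, List.foldl_append, ih]
    have hne : ¬ ((k : Int) + 1 = 0) := by omega
    have hg : PySem.List.pyGetD price ((k : Int) + 1) 0 = price.getD (k + 1) 0 := by
      simpa using PySem.List.pyGetD_natCast price (k + 1) 0
    have hgm : PySem.List.pyGetD meat ((k : Int) + 1) 0 = meat.getD (k + 1) 0 := by
      simpa using PySem.List.pyGetD_natCast meat (k + 1) 0
    simp only [List.foldl_cons, List.foldl_nil, hg, hgm, hne, false_or]
    by_cases hcmp : price.getD (k + 1) 0 < pvPm price k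
    · simp [hcmp, pvS, pvPm]
    · simp [hcmp, pvS, pvPm]

theorem pvB_eq (meat price : List Int) (n : Int) : func_alt meat price n = pvS meat price n.toNat := by
  by_cases hn : n ≤ 0
  · have h0 : n.toNat = 0 := by omega
    rw [h0]
    simp [func_alt, PySem.List.pyRange_one_eq_nil (show n ≤ 0 by omega), pvS]
  · obtain ⟨k, hk⟩ : ∃ k : Nat, n = (k : Int) + 1 := ⟨(n - 1).toNat, by omega⟩
    have hkt : n.toNat = k + 1 := by omega
    rw [hkt]
    unfold func_alt
    rw [hk, pvB_fold meat price k]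

-- ===== VERDICT (by name: the statement is the Claim_ definition above) =====
theorem func_spec : Claim_equal_func := by
  intro meat price n _ _
  unfold Spec_func
  by_cases hn : 0 ≤ n
  · have hn' : n = (n.toNat : Int) := by omega
    rw [hn', pvA_eq n.toNat meat price, pvB_eq, Int.toNat_natCast]
  · -- n < 0: both loops are empty and findMin returns 0
    have hfm : findMin price n = 0 := by
      simp [findMin, PySem.List.pyRange_one_eq_nil (show n ≤ 1 by omega)]
    have hA : func meat price n = 0 := by
      rw [func]
      rw [hfm]
      rw [dif_pos rfl]
      simp [PySem.List.pyRange_one_eq_nil (show n ≤ 0 by omega)]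
    rw [hA, pvB_eq]
    have h0 : n.toNat = 0 := by omega
    rw [h0]
    rfl
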